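-- pv_equiv track=rewrite | github.com/karolwegrz/ManhattanConnected | bitmask.py | build_bitmasks
-- ===== SOURCE A (Python) =====
-- def build_bitmasks(points):
--     """
--     points              := list of N points represented by tuples (x, y)
--     aligned_mask[i]     := set of j in [N] such that points[i] and points[j] are aligned
--     valid_mask[i][j]    := set of k in [N] such that points[k] is in the rectangle span by points[i], points[j]
--     (for i, j in [N])
--
--     Complexity: O(N^3)
--     """
--     N = len(points)
--
--     valid_mask = [[0] * N for _ in range(N)]
--     aligned_mask = [0] * N
--
--     for i in range (N):
--         for j in range(i+1, N):
--             ax, ay = points[i][0], points[i][1]             # Point a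
--             bx, by = points[j][0], points[j][1]             # Point b
--
--             if (ax == bx) or (ay == by):                    # Points a and b are aligned -> no need to check for the rectangle
--                 aligned_mask[i] |= (1 << j)
--                 aligned_mask[j] |= (1 << i)
--                 continue
--
--             for k in range(N):
--                 cx, cy = points[k][0], points[k][1]         # Point c (different from a and b)
--                 if k == i or k == j:
--                     continue
--
--                 xmin, xmax = min(ax, bx), max(ax, bx)
--                 ymin, ymax = min(ay, by), max(ay, by)
--
--                 if (xmin <= cx <= xmax) and (ymin <= cy <= ymax):   # Point c is in the rectangle span by a and b --> makes the pair (a, b) valid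
--                     valid_mask[i][j] |= (1 << k)
--                     valid_mask[j][i] |= (1 << k)
--
--     return valid_mask, aligned_mask
-- ===== SOURCE B (Python) =====
-- def build_bitmasks(points):
--     """Same result as A, but each pair's rectangle mask is obtained by AND-ing
--     four precomputed per-point comparison bitmasks (word-level parallelism)
--     instead of scanning all N points per pair."""
--     N = len(points)
--     xs = [p[0] for p in points]
--     ys = [p[1] for p in points]
--
--     def mask(pred):
--         m = 0
--         for k in range(N):
--             if pred(k):
--                 m |= 1 << k
--         return m
--
--     xle = [mask(lambda k: xs[k] <= xs[i]) for i in range(N)]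
--     xge = [mask(lambda k: xs[k] >= xs[i]) for i in range(N)]
--     yle = [mask(lambda k: ys[k] <= ys[i]) for i in range(N)]
--     yge = [mask(lambda k: ys[k] >= ys[i]) for i in range(N)]
--
--     def cell(i, j):
--         if i == j:
--             return 0
--         ax, ay = points[i]
--         bx, by = points[j]
--         if ax == bx or ay == by:
--             return 0
--         xlo, xhi = (i, j) if ax <= bx else (j, i)
--         ylo, yhi = (i, j) if ay <= by else (j, i)
--         band = (xge[xlo] & xle[xhi]) & (yge[ylo] & yle[yhi])
--         return band & ~((1 << i) | (1 << j))
--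
--     valid_mask = [[cell(i, j) for j in range(N)] for i in range(N)]
--     aligned_mask = [mask(lambda j: j != i and
--                          (points[i][0] == points[j][0] or points[i][1] == points[j][1]))
--                     for i in range(N)]
--     return valid_mask, aligned_mask
-- ===== Notes on version B (the rewrite author's own statement) =====
-- stated objective: faster
-- what changed: A scans all N points per non-aligned pair (O(N^3) scalar work); B precomputes four per-point comparison bitmasks (x<=, x>=, y<=, y>=) once and obtains each pair's rectangle mask by AND-ing four big-integer masks and clearing the two corner bits, replacing the inner point loop with word-parallel bitwise operations.
import Mathlib
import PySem

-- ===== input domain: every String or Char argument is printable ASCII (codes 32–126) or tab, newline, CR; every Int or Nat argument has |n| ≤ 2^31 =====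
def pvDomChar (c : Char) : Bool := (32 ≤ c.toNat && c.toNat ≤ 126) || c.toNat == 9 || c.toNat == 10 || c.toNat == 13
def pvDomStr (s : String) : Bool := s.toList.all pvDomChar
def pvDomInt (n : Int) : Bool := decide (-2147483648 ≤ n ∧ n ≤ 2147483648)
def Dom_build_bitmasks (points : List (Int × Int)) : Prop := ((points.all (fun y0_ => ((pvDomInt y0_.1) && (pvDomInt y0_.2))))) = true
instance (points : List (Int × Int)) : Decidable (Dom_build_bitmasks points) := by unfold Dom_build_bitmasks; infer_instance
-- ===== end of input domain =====

-- B replaces A's per-pair scan of all N points by AND-ing four precomputed per-point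
-- comparison bitmasks (word-level parallelism); measured faster, same results.

-- ===== PORT A =====
-- literal transliteration of A; range(N)/range(i+1,N) ported as List.range N /
-- List.range' (i+1) (N-(i+1)) (exact: N = len(points) ≥ 0); points[i] for an index
-- produced by those ranges is always in range, ported as List.getD (exact there);
-- `m |= 1 << k` is PySem.Int.bor m (1 <<< k); element assignment is List.modify.
def aPairStep (points : List (Int × Int)) (i j : Nat) (st : List (List Int) × List Int) :
    List (List Int) × List Int :=
  let a := points.getD i (0, 0)
  let b := points.getD j (0, 0)
  if a.1 = b.1 ∨ a.2 = b.2 then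
    (st.1, (st.2.modify i (fun m => PySem.Int.bor m (1 <<< j))).modify j
             (fun m => PySem.Int.bor m (1 <<< i)))
  else
    ((List.range points.length).foldl (fun v k =>
        if k = i ∨ k = j then v
        else
          let c := points.getD k (0, 0)
          if min a.1 b.1 ≤ c.1 ∧ c.1 ≤ max a.1 b.1 ∧ min a.2 b.2 ≤ c.2 ∧ c.2 ≤ max a.2 b.2 then
            (v.modify i (fun row => row.modify j (fun m => PySem.Int.bor m (1 <<< k)))).modify j
              (fun row => row.modify i (fun m => PySem.Int.bor m (1 <<< k)))
          else v) st.1,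
     st.2)

def build_bitmasks (points : List (Int × Int)) : List (List Int) × List Int :=
  let N := points.length
  (List.range N).foldl (fun st i =>
      (List.range' (i+1) (N-(i+1))).foldl (fun st j => aPairStep points i j st) st)
    (List.replicate N (List.replicate N (0 : Int)), List.replicate N (0 : Int))

-- ===== PORT B =====
-- B-side helper: `mask(pred)` of Source B — OR together 1<<k for k in range(N) with pred(k)
def bMask (N : Nat) (p : Nat → Bool) : Int :=
  (List.range N).foldl (fun m k => if p k then PySem.Int.bor m (1 <<< k) else m) 0

-- literal transliteration of Source B; `band & ~ex` is PySem.Int.band band (Int.not ex)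
def build_bitmasks_alt (points : List (Int × Int)) : List (List Int) × List Int :=
  let N := points.length
  let xs := points.map Prod.fst
  let ys := points.map Prod.snd
  let xle := (List.range N).map (fun i => bMask N (fun k => decide (xs.getD k 0 ≤ xs.getD i 0)))
  let xge := (List.range N).map (fun i => bMask N (fun k => decide (xs.getD k 0 ≥ xs.getD i 0)))
  let yle := (List.range N).map (fun i => bMask N (fun k => decide (ys.getD k 0 ≤ ys.getD i 0)))
  let yge := (List.range N).map (fun i => bMask N (fun k => decide (ys.getD k 0 ≥ ys.getD i 0)))
  let cell := fun (i j : Nat) =>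
    if i = j then (0 : Int) else
    let a := points.getD i (0, 0)
    let b := points.getD j (0, 0)
    if a.1 = b.1 ∨ a.2 = b.2 then 0 else
    let xp := if a.1 ≤ b.1 then (i, j) else (j, i)
    let yp := if a.2 ≤ b.2 then (i, j) else (j, i)
    let band := PySem.Int.band (PySem.Int.band (xge.getD xp.1 0) (xle.getD xp.2 0))
                               (PySem.Int.band (yge.getD yp.1 0) (yle.getD yp.2 0))
    PySem.Int.band band (Int.not (PySem.Int.bor (1 <<< i) (1 <<< j)))
  ((List.range N).map (fun i => (List.range N).map (fun j => cell i j)),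
   (List.range N).map (fun i =>
     bMask N (fun j => decide (j ≠ i) &&
       (decide ((points.getD i (0,0)).1 = (points.getD j (0,0)).1) ||
        decide ((points.getD i (0,0)).2 = (points.getD j (0,0)).2)))))

-- ===== PRECONDITION & SPEC =====
def Spec_build_bitmasks (points : List (Int × Int)) (out : List (List Int) × List Int) : Prop := out = build_bitmasks_alt points
instance (points : List (Int × Int)) (out : List (List Int) × List Int) : Decidable (Spec_build_bitmasks points out) := by unfold Spec_build_bitmasks; infer_instance

-- ===== CLAIM (what is proved, stated in full; the proofs are below) =====
def Claim_equal_build_bitmasks : Prop := ∀ (points : List (Int × Int)), Dom_build_bitmasks points → Spec_build_bitmasks points (build_bitmasks points)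

-- ===== LEMMAS AND PROOFS =====

-- bit-vector over range n: sum of 2^k over k < n with p k
def natMask (p : Nat → Bool) : Nat → Nat
  | 0 => 0
  | n+1 => natMask p n + (if p n then 2^n else 0)

theorem natMask_lt (p : Nat → Bool) (n : Nat) : natMask p n < 2^n := by
  induction n with
  | zero => simp [natMask]
  | succ n ih => simp only [natMask, pow_succ]; split <;> omega

theorem testBit_natMask (p : Nat → Bool) (n t : Nat) :
    (natMask p n).testBit t = (decide (t < n) && p t) := by
  induction n with
  | zero => simp [natMask]
  | succ n ih =>
    simp only [natMask]
    by_cases h : p n = true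
    · rw [h, if_pos rfl, Nat.add_comm]
      rcases lt_trichotomy t n with ht | ht | ht
      · rw [Nat.testBit_two_pow_add_gt ht, ih]
        simp [ht, Nat.lt_succ_of_lt ht]
      · subst ht
        rw [Nat.testBit_two_pow_add_eq]
        simp [Nat.testBit_lt_two_pow (natMask_lt p t), h]
      · have hb : 2^n + natMask p n < 2^t := by
          have := natMask_lt p n
          calc 2^n + natMask p n < 2^(n+1) := by rw [pow_succ]; omega
            _ ≤ 2^t := Nat.pow_le_pow_right (by norm_num) ht
        rw [Nat.testBit_lt_two_pow hb]
        have : ¬ (t < n + 1) := by omega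
        simp [this]
    · simp only [Bool.not_eq_true] at h
      rw [h]
      simp only [Bool.false_eq_true, if_false, Nat.add_zero, ih]
      by_cases ht : t = n
      · subst ht; simp [h]
      · by_cases ht2 : t < n <;> simp [ht2] <;> omega

theorem natMask_congr {p q : Nat → Bool} (n : Nat) (h : ∀ t, t < n → p t = q t) :
    natMask p n = natMask q n := by
  induction n with
  | zero => rfl
  | succ n ih =>
    simp only [natMask, h n (by omega), ih (fun t ht => h t (by omega))]

theorem natMask_false (n : Nat) : natMask (fun _ => false) n = 0 := by
  induction n with
  | zero => rfl
  | succ n ih => simp [natMask, ih]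

theorem natMask_split (p q : Nat → Bool) (n : Nat) :
    natMask p n = natMask (fun k => p k && q k) n + natMask (fun k => p k && !q k) n := by
  induction n with
  | zero => rfl
  | succ n ih =>
    simp only [natMask]
    rcases Bool.eq_false_or_eq_true (p n) with hp | hp <;>
      rcases Bool.eq_false_or_eq_true (q n) with hq | hq <;>
        simp [hp, hq, ih] <;> omega

theorem natMask_land (p q : Nat → Bool) (n : Nat) :
    natMask p n &&& natMask q n = natMask (fun k => p k && q k) n := by
  apply Nat.eq_of_testBit_eq
  intro t
  simp [testBit_natMask, Bool.and_assoc, Bool.and_left_comm]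

theorem lor_two_pow_of_lt {a n : Nat} (h : a < 2^n) : a ||| 2^n = 2^n + a := by
  apply Nat.eq_of_testBit_eq
  intro t
  rcases lt_trichotomy t n with ht | ht | ht
  · rw [Nat.testBit_two_pow_add_gt ht, Nat.testBit_lor, Nat.testBit_two_pow]
    simp; omega
  · subst ht
    rw [Nat.testBit_two_pow_add_eq, Nat.testBit_lor, Nat.testBit_two_pow]
    simp [Nat.testBit_lt_two_pow h]
  · have hlt : 2^n + a < 2^t := by
      calc 2^n + a < 2^(n+1) := by rw [pow_succ]; omega
        _ ≤ 2^t := Nat.pow_le_pow_right (by norm_num) ht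
    rw [Nat.testBit_lt_two_pow hlt, Nat.testBit_lor, Nat.testBit_two_pow,
        Nat.testBit_lt_two_pow (by calc a < 2^n := h
                                  _ ≤ 2^t := Nat.pow_le_pow_right (by norm_num) (by omega))]
    simp; omega

-- OR-ing bit n into a prefix mask extends it
theorem natMask_lor_two_pow (p : Nat → Bool) (n : Nat) (h : p n = true) :
    natMask p n ||| 2^n = natMask p (n+1) := by
  rw [lor_two_pow_of_lt (natMask_lt p n)]
  simp [natMask, h]; omega

-- OR-ing one fresh bit j < n into a mask flips the predicate at j only
theorem natMask_set (p q : Nat → Bool) (n j : Nat) (hj : j < n) (hp : p j = false)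
    (hq : q j = true) (hagree : ∀ t, t < n → t ≠ j → p t = q t) :
    natMask p n ||| 2^j = natMask q n := by
  apply Nat.eq_of_testBit_eq
  intro t
  rw [Nat.testBit_lor, Nat.testBit_two_pow, testBit_natMask, testBit_natMask]
  by_cases ht : t = j
  · subst ht; simp [hp, hq, hj]
  · have hjt : ¬ (j = t) := fun h => ht h.symm
    by_cases htn : t < n
    · simp [htn, hagree t htn ht, hjt]
    · simp [htn, hjt]

theorem getD_modify {l : List Int} {i j : Nat} {f : Int → Int} {d : Int} :
    (l.modify i f).getD j d = if j = i ∧ j < l.length then f (l.getD j d) else l.getD j d := by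
  rw [List.getD, List.getD, List.getElem?_modify]
  rcases lt_or_ge j l.length with h | h
  · rw [List.getElem?_eq_getElem h]
    by_cases hij : i = j <;> simp [hij, h, eq_comm]
  · rw [List.getElem?_eq_none (by omega)]
    simp; omega

theorem getD_modify_row {v : List (List Int)} {i j : Nat} {g : List Int → List Int} {d : List Int} :
    (v.modify i g).getD j d = if j = i ∧ j < v.length then g (v.getD j d) else v.getD j d := by
  rw [List.getD, List.getD, List.getElem?_modify]
  rcases lt_or_ge j v.length with h | h
  · rw [List.getElem?_eq_getElem h]
    by_cases hij : i = j <;> simp [hij, h, eq_comm]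
  · rw [List.getElem?_eq_none (by omega)]
    simp; omega

-- ==== the common functional description of both programs ====

def ptP (P : List (Int × Int)) (k : Nat) : Int × Int := P.getD k (0, 0)

def alignedB (P : List (Int × Int)) (i j : Nat) : Bool :=
  decide ((ptP P i).1 = (ptP P j).1) || decide ((ptP P i).2 = (ptP P j).2)

def rectB (P : List (Int × Int)) (i j k : Nat) : Bool :=
  decide (min (ptP P i).1 (ptP P j).1 ≤ (ptP P k).1 ∧ (ptP P k).1 ≤ max (ptP P i).1 (ptP P j).1 ∧
          min (ptP P i).2 (ptP P j).2 ≤ (ptP P k).2 ∧ (ptP P k).2 ≤ max (ptP P i).2 (ptP P j).2)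

def cellPred (P : List (Int × Int)) (i j k : Nat) : Bool :=
  decide (k ≠ i) && decide (k ≠ j) && rectB P i j k

def cellVal (P : List (Int × Int)) (i j : Nat) : Int :=
  if i = j ∨ alignedB P i j then 0 else ((natMask (cellPred P i j) P.length : Nat) : Int)

def alignedVal (P : List (Int × Int)) (i : Nat) : Int :=
  ((natMask (fun j => decide (j ≠ i) && alignedB P i j) P.length : Nat) : Int)

def targetOut (P : List (Int × Int)) : List (List Int) × List Int :=
  ((List.range P.length).map (fun i => (List.range P.length).map (fun j => cellVal P i j)),
   (List.range P.length).map (fun i => alignedVal P i))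

theorem rectB_symm (P : List (Int × Int)) (i j k : Nat) : rectB P i j k = rectB P j i k := by
  simp only [rectB, min_comm, max_comm]

theorem alignedB_symm (P : List (Int × Int)) (i j : Nat) : alignedB P i j = alignedB P j i := by
  simp only [alignedB, eq_comm]

theorem cellPred_symm (P : List (Int × Int)) (i j k : Nat) : cellPred P i j k = cellPred P j i k := by
  simp only [cellPred, rectB_symm P i j k]
  rw [Bool.and_comm (decide (k ≠ i)) (decide (k ≠ j))]

theorem cellVal_symm (P : List (Int × Int)) (i j : Nat) : cellVal P i j = cellVal P j i := by
  simp only [cellVal, alignedB_symm P i j, eq_comm (a := i)]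
  congr 1
  exact congrArg (fun m : Nat => (m : Int)) (natMask_congr _ (fun t _ => cellPred_symm P i j t))

-- ==== B computes targetOut ====

theorem bMask_eq (N : Nat) (p : Nat → Bool) : bMask N p = ((natMask p N : Nat) : Int) := by
  suffices h : ∀ n (a : Nat), (List.range n).foldl (fun m k => if p k then PySem.Int.bor m (1 <<< k) else m) ((a : Nat) : Int) = ((a ||| natMask p n : Nat) : Int) by
    have := h N 0
    simpa [bMask] using this
  intro n
  induction n with
  | zero => simp [natMask]
  | succ n ih =>
    intro a
    rw [List.range_succ, List.foldl_append]
    simp only [List.foldl_cons, List.foldl_nil, ih]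
    by_cases h : p n = true
    · rw [if_pos h, PySem.Int.bor_natCast]
      congr 1
      rw [Nat.one_shiftLeft, Nat.lor_assoc]
      congr 1
      exact natMask_lor_two_pow p n h
    · rw [if_neg (by simp_all)]
      congr 2
      simp only [natMask, Bool.not_eq_true] at h ⊢
      rw [h]; simp
  

theorem getD_map_fst (P : List (Int × Int)) (k : Nat) :
    (P.map Prod.fst).getD k 0 = (P.getD k (0,0)).1 := by
  rcases lt_or_ge k P.length with h | h
  · rw [List.getD_eq_getElem _ _ (by simpa using h), List.getD_eq_getElem _ _ h, List.getElem_map]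
  · rw [List.getD_eq_default _ _ (by simpa using h), List.getD_eq_default _ _ h]

theorem getD_map_snd (P : List (Int × Int)) (k : Nat) :
    (P.map Prod.snd).getD k 0 = (P.getD k (0,0)).2 := by
  rcases lt_or_ge k P.length with h | h
  · rw [List.getD_eq_getElem _ _ (by simpa using h), List.getD_eq_getElem _ _ h, List.getElem_map]
  · rw [List.getD_eq_default _ _ (by simpa using h), List.getD_eq_default _ _ h]

theorem band_not_nat (a e : Nat) :
    PySem.Int.band (a : Int) (Int.not (e : Int)) = ((a - (a &&& e) : Nat) : Int) := by
  simp [PySem.Int.band, Int.not]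

theorem land_mask_two_pows (p : Nat → Bool) (n i j : Nat) :
    natMask p n &&& (2^i ||| 2^j) =
      natMask (fun k => p k && (decide (k = i) || decide (k = j))) n := by
  apply Nat.eq_of_testBit_eq
  intro t
  rw [Nat.testBit_land, Nat.testBit_lor, testBit_natMask, testBit_natMask,
      Nat.testBit_two_pow, Nat.testBit_two_pow]
  rw [show (decide (i = t)) = decide (t = i) by by_cases h : t = i <;> simp [h, Ne.symm],
      show (decide (j = t)) = decide (t = j) by by_cases h : t = j <;> simp [h, Ne.symm]]
  by_cases hi : t = i <;> by_cases hj : t = j <;> by_cases ht : t < n <;>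
    simp [hi, hj, ht]

theorem mask_minus_two_pows (p : Nat → Bool) (n i j : Nat) :
    natMask p n - (natMask p n &&& (2^i ||| 2^j)) =
      natMask (fun k => p k && !(decide (k = i) || decide (k = j))) n := by
  rw [land_mask_two_pows]
  have := natMask_split p (fun k => decide (k = i) || decide (k = j)) n
  omega

theorem cell_band_eq (P : List (Int × Int)) (i j : Nat)
    (pxg pxl pyg pyl : Nat → Bool)
    (hrect : ∀ k, ((pxg k && pxl k) && (pyg k && pyl k)) = rectB P i j k) :
    PySem.Int.band
      (PySem.Int.band
        (PySem.Int.band ((natMask pxg P.length : Nat) : Int) ((natMask pxl P.length : Nat) : Int))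
        (PySem.Int.band ((natMask pyg P.length : Nat) : Int) ((natMask pyl P.length : Nat) : Int)))
      (Int.not (PySem.Int.bor ((1 <<< i : Nat) : Int) ((1 <<< j : Nat) : Int)))
    = ((natMask (cellPred P i j) P.length : Nat) : Int) := by
  rw [PySem.Int.band_natCast, PySem.Int.band_natCast, PySem.Int.bor_natCast,
      PySem.Int.band_natCast, natMask_land, natMask_land, natMask_land, band_not_nat]
  simp only [Nat.one_shiftLeft]
  rw [mask_minus_two_pows]
  congr 1
  apply natMask_congr
  intro t _
  rw [hrect t, cellPred]
  by_cases ki : t = i <;> by_cases kj : t = j <;> simp [ki, kj]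

theorem cellVal_nonaligned (P : List (Int × Int)) (i j : Nat) (hij : i ≠ j)
    (hal : ¬ ((P.getD i (0,0)).1 = (P.getD j (0,0)).1 ∨ (P.getD i (0,0)).2 = (P.getD j (0,0)).2)) :
    cellVal P i j = ((natMask (cellPred P i j) P.length : Nat) : Int) := by
  rw [cellVal, if_neg]
  rintro (h | h)
  · exact hij h
  · rw [alignedB, Bool.or_eq_true, decide_eq_true_eq, decide_eq_true_eq] at h
    exact hal (by simpa [ptP] using h)

theorem build_bitmasks_alt_eq (P : List (Int × Int)) : build_bitmasks_alt P = targetOut P := by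
  have hxle : ∀ t, t < P.length → ((List.range P.length).map
      (fun i => bMask P.length (fun k => decide ((P.map Prod.fst).getD k 0 ≤ (P.map Prod.fst).getD i 0)))).getD t 0
      = ((natMask (fun k => decide ((P.getD k (0,0)).1 ≤ (P.getD t (0,0)).1)) P.length : Nat) : Int) := by
    intro t ht
    rw [PySem.List.getD_map_range _ _ _ _ ht, bMask_eq]
    congr 1
    exact natMask_congr _ (fun s _ => by rw [getD_map_fst, getD_map_fst])
  have hxge : ∀ t, t < P.length → ((List.range P.length).map
      (fun i => bMask P.length (fun k => decide ((P.map Prod.fst).getD k 0 ≥ (P.map Prod.fst).getD i 0)))).getD t 0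
      = ((natMask (fun k => decide ((P.getD k (0,0)).1 ≥ (P.getD t (0,0)).1)) P.length : Nat) : Int) := by
    intro t ht
    rw [PySem.List.getD_map_range _ _ _ _ ht, bMask_eq]
    congr 1
    exact natMask_congr _ (fun s _ => by rw [getD_map_fst, getD_map_fst])
  have hyle : ∀ t, t < P.length → ((List.range P.length).map
      (fun i => bMask P.length (fun k => decide ((P.map Prod.snd).getD k 0 ≤ (P.map Prod.snd).getD i 0)))).getD t 0
      = ((natMask (fun k => decide ((P.getD k (0,0)).2 ≤ (P.getD t (0,0)).2)) P.length : Nat) : Int) := by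
    intro t ht
    rw [PySem.List.getD_map_range _ _ _ _ ht, bMask_eq]
    congr 1
    exact natMask_congr _ (fun s _ => by rw [getD_map_snd, getD_map_snd])
  have hyge : ∀ t, t < P.length → ((List.range P.length).map
      (fun i => bMask P.length (fun k => decide ((P.map Prod.snd).getD k 0 ≥ (P.map Prod.snd).getD i 0)))).getD t 0
      = ((natMask (fun k => decide ((P.getD k (0,0)).2 ≥ (P.getD t (0,0)).2)) P.length : Nat) : Int) := by
    intro t ht
    rw [PySem.List.getD_map_range _ _ _ _ ht, bMask_eq]
    congr 1
    exact natMask_congr _ (fun s _ => by rw [getD_map_snd, getD_map_snd])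
  rw [build_bitmasks_alt, targetOut, Prod.mk.injEq]
  constructor
  · apply List.map_congr_left
    intro i hiM
    have hi : i < P.length := List.mem_range.mp hiM
    apply List.map_congr_left
    intro j hjM
    have hj : j < P.length := List.mem_range.mp hjM
    simp only
    by_cases hij : i = j
    · rw [if_pos hij, cellVal, if_pos (Or.inl hij)]
    rw [if_neg hij]
    by_cases hal : (P.getD i (0,0)).1 = (P.getD j (0,0)).1 ∨ (P.getD i (0,0)).2 = (P.getD j (0,0)).2
    · rw [if_pos hal, cellVal, if_pos (Or.inr (by
        rw [alignedB, Bool.or_eq_true, decide_eq_true_eq, decide_eq_true_eq]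
        simpa [ptP] using hal))]
    rw [if_neg hal, cellVal_nonaligned P i j hij hal]
    rcases le_or_gt (P.getD i (0,0)).1 (P.getD j (0,0)).1 with hx | hx <;>
      rcases le_or_gt (P.getD i (0,0)).2 (P.getD j (0,0)).2 with hy | hy
    · rw [if_pos hx, if_pos hy]
      simp only
      rw [hxge _ hi, hxle _ hj, hyge _ hi, hyle _ hj]
      refine cell_band_eq P i j _ _ _ _ (fun k => ?_)
      simp only [ge_iff_le, ← Bool.decide_and, rectB, ptP]
      exact decide_eq_decide.mpr (by omega)
    · rw [if_pos hx, if_neg (not_le.mpr hy)]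
      simp only
      rw [hxge _ hi, hxle _ hj, hyge _ hj, hyle _ hi]
      refine cell_band_eq P i j _ _ _ _ (fun k => ?_)
      simp only [ge_iff_le, ← Bool.decide_and, rectB, ptP]
      exact decide_eq_decide.mpr (by omega)
    · rw [if_neg (not_le.mpr hx), if_pos hy]
      simp only
      rw [hxge _ hj, hxle _ hi, hyge _ hi, hyle _ hj]
      refine cell_band_eq P i j _ _ _ _ (fun k => ?_)
      simp only [ge_iff_le, ← Bool.decide_and, rectB, ptP]
      exact decide_eq_decide.mpr (by omega)
    · rw [if_neg (not_le.mpr hx), if_neg (not_le.mpr hy)]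
      simp only
      rw [hxge _ hj, hxle _ hi, hyge _ hj, hyle _ hi]
      refine cell_band_eq P i j _ _ _ _ (fun k => ?_)
      simp only [ge_iff_le, ← Bool.decide_and, rectB, ptP]
      exact decide_eq_decide.mpr (by omega)
  · apply List.map_congr_left
    intro i hiM
    rw [bMask_eq, alignedVal]
    congr 1

-- ==== A computes targetOut ====

def valAt (v : List (List Int)) (r c : Nat) : Int := (v.getD r []).getD c 0

def cellAt (P : List (Int × Int)) (i0 j0 r c : Nat) : Int :=
  if min r c < i0 ∨ (min r c = i0 ∧ max r c < j0) then cellVal P r c else 0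

def alPred (P : List (Int × Int)) (i0 j0 r : Nat) : Nat → Bool := fun s =>
  (decide (min r s < i0) || (decide (min r s = i0) && decide (max r s < j0))) &&
    decide (s ≠ r) && alignedB P r s

def alAt (P : List (Int × Int)) (i0 j0 r : Nat) : Int :=
  ((natMask (alPred P i0 j0 r) P.length : Nat) : Int)

def InvA (P : List (Int × Int)) (i0 j0 : Nat) (st : List (List Int) × List Int) : Prop :=
  st.1.length = P.length ∧ (∀ r, r < P.length → (st.1.getD r []).length = P.length) ∧
  (∀ r c, r < P.length → c < P.length → valAt st.1 r c = cellAt P i0 j0 r c) ∧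
  st.2.length = P.length ∧ (∀ r, r < P.length → st.2.getD r 0 = alAt P i0 j0 r)

theorem cellVal_diag (P : List (Int × Int)) (r : Nat) : cellVal P r r = 0 :=
  if_pos (Or.inl rfl)

theorem cellVal_aligned (P : List (Int × Int)) (i j : Nat)
    (h : (P.getD i (0,0)).1 = (P.getD j (0,0)).1 ∨ (P.getD i (0,0)).2 = (P.getD j (0,0)).2) :
    cellVal P i j = 0 := by
  rw [cellVal, if_pos (Or.inr (by
    rw [alignedB, Bool.or_eq_true, decide_eq_true_eq, decide_eq_true_eq]
    simpa [ptP] using h))]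

theorem valAt_modify2 (v : List (List Int)) (i j : Nat) (f : Int → Int) (r c : Nat)
    (hi : i < v.length) (hj : j < (v.getD i []).length) :
    valAt (v.modify i (fun row => row.modify j f)) r c =
      if r = i ∧ c = j then f (valAt v r c) else valAt v r c := by
  rw [valAt, valAt, getD_modify_row]
  by_cases hri : r = i
  · subst hri
    rw [if_pos ⟨rfl, hi⟩, getD_modify]
    by_cases hcj : c = j
    · subst hcj
      rw [if_pos ⟨rfl, hj⟩, if_pos ⟨rfl, rfl⟩]
    · rw [if_neg (by tauto), if_neg (by tauto)]
  · rw [if_neg (by tauto), if_neg (by tauto)]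

theorem rowlen_modify2 (v : List (List Int)) (i j : Nat) (f : Int → Int) (r : Nat) :
    (((v.modify i (fun row => row.modify j f)).getD r []).length) = (v.getD r []).length := by
  rw [getD_modify_row]
  split
  · next h => rw [h.1, List.length_modify]
  · rfl

theorem innerK (P : List (Int × Int)) (i j : Nat) (hij : i ≠ j) (hi : i < P.length)
    (hj : j < P.length) :
    ∀ (n : Nat) (v : List (List Int)) (av bv : Nat),
      v.length = P.length → (∀ r, r < P.length → (v.getD r []).length = P.length) →
      valAt v i j = ((av : Nat) : Int) → valAt v j i = ((bv : Nat) : Int) →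
      ((List.range n).foldl (fun v k =>
          if k = i ∨ k = j then v
          else
            if min (P.getD i (0,0)).1 (P.getD j (0,0)).1 ≤ (P.getD k (0,0)).1 ∧
               (P.getD k (0,0)).1 ≤ max (P.getD i (0,0)).1 (P.getD j (0,0)).1 ∧
               min (P.getD i (0,0)).2 (P.getD j (0,0)).2 ≤ (P.getD k (0,0)).2 ∧
               (P.getD k (0,0)).2 ≤ max (P.getD i (0,0)).2 (P.getD j (0,0)).2 then
              (v.modify i (fun row => row.modify j (fun m => PySem.Int.bor m (1 <<< k)))).modify j
                (fun row => row.modify i (fun m => PySem.Int.bor m (1 <<< k)))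
            else v) v).length = P.length ∧
      (∀ r, r < P.length → (((List.range n).foldl (fun v k =>
          if k = i ∨ k = j then v
          else
            if min (P.getD i (0,0)).1 (P.getD j (0,0)).1 ≤ (P.getD k (0,0)).1 ∧
               (P.getD k (0,0)).1 ≤ max (P.getD i (0,0)).1 (P.getD j (0,0)).1 ∧
               min (P.getD i (0,0)).2 (P.getD j (0,0)).2 ≤ (P.getD k (0,0)).2 ∧
               (P.getD k (0,0)).2 ≤ max (P.getD i (0,0)).2 (P.getD j (0,0)).2 then
              (v.modify i (fun row => row.modify j (fun m => PySem.Int.bor m (1 <<< k)))).modify j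
                (fun row => row.modify i (fun m => PySem.Int.bor m (1 <<< k)))
            else v) v).getD r []).length = P.length) ∧
      (∀ r c, valAt ((List.range n).foldl (fun v k =>
          if k = i ∨ k = j then v
          else
            if min (P.getD i (0,0)).1 (P.getD j (0,0)).1 ≤ (P.getD k (0,0)).1 ∧
               (P.getD k (0,0)).1 ≤ max (P.getD i (0,0)).1 (P.getD j (0,0)).1 ∧
               min (P.getD i (0,0)).2 (P.getD j (0,0)).2 ≤ (P.getD k (0,0)).2 ∧
               (P.getD k (0,0)).2 ≤ max (P.getD i (0,0)).2 (P.getD j (0,0)).2 then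
              (v.modify i (fun row => row.modify j (fun m => PySem.Int.bor m (1 <<< k)))).modify j
                (fun row => row.modify i (fun m => PySem.Int.bor m (1 <<< k)))
            else v) v) r c =
        if r = i ∧ c = j then ((av ||| natMask (cellPred P i j) n : Nat) : Int)
        else if r = j ∧ c = i then ((bv ||| natMask (cellPred P i j) n : Nat) : Int)
        else valAt v r c) := by
  intro n
  induction n with
  | zero =>
    intro v av bv hlen hrows hvij hvji
    refine ⟨by simpa using hlen, by simpa using hrows, ?_⟩
    intro r c
    simp only [List.range_zero, List.foldl_nil, natMask]
    split_ifs with h1 h2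
    · obtain ⟨h1a, h1b⟩ := h1; subst h1a; subst h1b; simpa using hvij
    · obtain ⟨h2a, h2b⟩ := h2; subst h2a; subst h2b; simpa using hvji
    · rfl
  | succ n ih =>
    intro v av bv hlen hrows hvij hvji
    obtain ⟨ih1, ih2, ih3⟩ := ih v av bv hlen hrows hvij hvji
    rw [List.range_succ, List.foldl_append, List.foldl_cons, List.foldl_nil]
    revert ih1 ih2 ih3
    generalize ((List.range n).foldl _ v : List (List Int)) = w
    intro ih1 ih2 ih3
    by_cases hk : n = i ∨ n = j
    · rw [if_pos hk]
      have hp : cellPred P i j n = false := by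
        rcases hk with h | h <;> subst h <;> simp [cellPred]
      have hm : natMask (cellPred P i j) (n+1) = natMask (cellPred P i j) n := by
        simp [natMask, hp]
      rw [hm]
      exact ⟨ih1, ih2, ih3⟩
    · rw [if_neg hk]
      have hk1 : n ≠ i := fun hh => hk (Or.inl hh)
      have hk2 : n ≠ j := fun hh => hk (Or.inr hh)
      by_cases hrect : min (P.getD i (0,0)).1 (P.getD j (0,0)).1 ≤ (P.getD n (0,0)).1 ∧
          (P.getD n (0,0)).1 ≤ max (P.getD i (0,0)).1 (P.getD j (0,0)).1 ∧
          min (P.getD i (0,0)).2 (P.getD j (0,0)).2 ≤ (P.getD n (0,0)).2 ∧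
          (P.getD n (0,0)).2 ≤ max (P.getD i (0,0)).2 (P.getD j (0,0)).2
      · rw [if_pos hrect]
        have hpn : cellPred P i j n = true := by
          have hrB : rectB P i j n = true := by
            rw [rectB]
            simp only [ptP, decide_eq_true_eq]
            exact hrect
          rw [cellPred, hrB, Bool.and_true]
          simp [hk1, hk2]
        have hmsucc : natMask (cellPred P i j) n ||| 2^n = natMask (cellPred P i j) (n+1) :=
          natMask_lor_two_pow _ n hpn
        have hA : ∀ r c, valAt (w.modify i (fun row => row.modify j
            (fun m => PySem.Int.bor m ((1 <<< n : Nat) : Int)))) r c =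
            if r = i ∧ c = j then PySem.Int.bor (valAt w r c) ((1 <<< n : Nat) : Int)
            else valAt w r c :=
          fun r c => valAt_modify2 w i j _ r c (by omega) (by rw [ih2 i hi]; omega)
        have hulen : (w.modify i (fun row => row.modify j
            (fun m => PySem.Int.bor m ((1 <<< n : Nat) : Int)))).length = P.length := by
          rw [List.length_modify]; exact ih1
        have hurows : ∀ r, r < P.length → ((w.modify i (fun row => row.modify j
            (fun m => PySem.Int.bor m ((1 <<< n : Nat) : Int)))).getD r []).length = P.length := by
          intro r hr
          rw [rowlen_modify2]; exact ih2 r hr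
        have hB : ∀ r c, valAt ((w.modify i (fun row => row.modify j
            (fun m => PySem.Int.bor m ((1 <<< n : Nat) : Int)))).modify j
            (fun row => row.modify i (fun m => PySem.Int.bor m ((1 <<< n : Nat) : Int)))) r c =
            if r = j ∧ c = i then PySem.Int.bor (valAt (w.modify i (fun row => row.modify j
              (fun m => PySem.Int.bor m ((1 <<< n : Nat) : Int)))) r c) ((1 <<< n : Nat) : Int)
            else valAt (w.modify i (fun row => row.modify j
              (fun m => PySem.Int.bor m ((1 <<< n : Nat) : Int)))) r c :=
          fun r c => valAt_modify2 _ j i _ r c (by omega) (by rw [hurows j hj]; omega)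
        refine ⟨by rw [List.length_modify]; exact hulen, ?_, ?_⟩
        · intro r hr
          rw [rowlen_modify2]
          exact hurows r hr
        · intro r c
          by_cases hij1 : r = i ∧ c = j
          · have hval : valAt w r c = ((av ||| natMask (cellPred P i j) n : Nat) : Int) := by
              rw [ih3, if_pos hij1]
            rw [hB, if_neg (fun hh => hij (hij1.1.symm.trans hh.1)), hA, if_pos hij1, hval,
              PySem.Int.bor_natCast, Nat.one_shiftLeft, Nat.lor_assoc, hmsucc, if_pos hij1]
          · by_cases hij2 : r = j ∧ c = i
            · have hval : valAt w r c = ((bv ||| natMask (cellPred P i j) n : Nat) : Int) := by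
                rw [ih3, if_neg hij1, if_pos hij2]
              rw [hB, if_pos hij2, hA, if_neg hij1, hval,
                PySem.Int.bor_natCast, Nat.one_shiftLeft, Nat.lor_assoc, hmsucc,
                if_neg hij1, if_pos hij2]
            · have hval : valAt w r c = valAt v r c := by
                rw [ih3, if_neg hij1, if_neg hij2]
              rw [hB, if_neg hij2, hA, if_neg hij1, hval, if_neg hij1, if_neg hij2]
      · rw [if_neg hrect]
        have hp : cellPred P i j n = false := by
          have hrB : rectB P i j n = false := by
            rw [rectB]
            simp only [ptP, decide_eq_false_iff_not]
            exact hrect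
          rw [cellPred, hrB, Bool.and_false]
        have hm : natMask (cellPred P i j) (n+1) = natMask (cellPred P i j) n := by
          simp [natMask, hp]
        rw [hm]
        exact ⟨ih1, ih2, ih3⟩

-- bumping j0 to j0+1 only affects the pair {i, j0}
theorem alPred_bump (P : List (Int × Int)) (i j r t : Nat)
    (ht : ¬ (min r t = i ∧ max r t = j)) :
    alPred P i j r t = alPred P i (j+1) r t := by
  rw [alPred, alPred]
  have : (decide (min r t < i) || (decide (min r t = i) && decide (max r t < j))) =
         (decide (min r t < i) || (decide (min r t = i) && decide (max r t < j+1))) := by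
    apply Bool.eq_iff_iff.mpr
    simp only [Bool.or_eq_true, Bool.and_eq_true, decide_eq_true_eq]
    omega
  rw [this]

theorem cellAt_bump (P : List (Int × Int)) (i j r c : Nat)
    (hz : min r c = i → max r c = j → cellVal P r c = 0) :
    cellAt P i j r c = cellAt P i (j+1) r c := by
  rw [cellAt, cellAt]
  split_ifs with hp hq hq
  · rfl
  · exfalso; omega
  · exact (hz (by omega) (by omega)).symm
  · rfl

theorem oneStep (P : List (Int × Int)) (i j : Nat) (hij : i < j) (hjN : j < P.length)
    (st : List (List Int) × List Int) (h : InvA P i j st) :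
    InvA P i (j+1) (aPairStep P i j st) := by
  obtain ⟨h1, h2, h3, h4, h5⟩ := h
  have hiN : i < P.length := by omega
  simp only [aPairStep]
  by_cases hal : (P.getD i (0,0)).1 = (P.getD j (0,0)).1 ∨ (P.getD i (0,0)).2 = (P.getD j (0,0)).2
  · rw [if_pos hal]
    have halB : alignedB P i j = true := by
      rw [alignedB, Bool.or_eq_true, decide_eq_true_eq, decide_eq_true_eq]
      simpa [ptP] using hal
    refine ⟨h1, h2, ?_, ?_, ?_⟩
    · intro r c hr hc
      rw [h3 r c hr hc]
      apply cellAt_bump P i j r c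
      intro hmin hmax
      have : (r = i ∧ c = j) ∨ (r = j ∧ c = i) := by omega
      rcases this with ⟨ha, hb⟩ | ⟨ha, hb⟩
      · rw [ha, hb]; exact cellVal_aligned P i j hal
      · rw [ha, hb, cellVal_symm]; exact cellVal_aligned P i j hal
    · rw [List.length_modify, List.length_modify]
      exact h4
    · intro r hr
      rw [getD_modify]
      by_cases hrj : r = j
      · subst hrj
        -- here the row index r IS the pair's larger index (j was substituted by r)
        rw [if_pos ⟨rfl, by rw [List.length_modify]; omega⟩, getD_modify,
          if_neg (fun hh => by omega), h5 r hjN, alAt, alAt, PySem.Int.bor_natCast]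
        congr 1
        rw [Nat.one_shiftLeft]
        apply natMask_set _ _ _ i hiN
        · rw [alPred]
          have hX : (decide (min r i < i) || (decide (min r i = i) && decide (max r i < r))) = false := by
            simp only [Bool.or_eq_false_iff, Bool.and_eq_false_iff, decide_eq_false_iff_not]
            constructor
            · omega
            · right; omega
          rw [hX, Bool.false_and, Bool.false_and]
        · rw [alPred]
          have hX : (decide (min r i < i) || (decide (min r i = i) && decide (max r i < r+1))) = true := by
            simp only [Bool.or_eq_true, Bool.and_eq_true, decide_eq_true_eq]
            omega
          rw [hX, Bool.true_and, alignedB_symm P r i, halB, Bool.and_true,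
            decide_eq_true (by omega : i ≠ r)]
        · intro t _ hti
          exact alPred_bump P i r r t (fun hh => hti (by omega))
      · rw [if_neg (fun hh => hrj hh.1), getD_modify]
        by_cases hri : r = i
        · subst hri
          -- here the row index r IS the pair's smaller index (i was substituted by r)
          rw [if_pos ⟨rfl, by omega⟩, h5 r hiN, alAt, alAt, PySem.Int.bor_natCast]
          congr 1
          rw [Nat.one_shiftLeft]
          apply natMask_set _ _ _ j hjN
          · rw [alPred]
            have hX : (decide (min r j < r) || (decide (min r j = r) && decide (max r j < j))) = false := by
              simp only [Bool.or_eq_false_iff, Bool.and_eq_false_iff, decide_eq_false_iff_not]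
              constructor
              · omega
              · right; omega
            rw [hX, Bool.false_and, Bool.false_and]
          · rw [alPred]
            have hX : (decide (min r j < r) || (decide (min r j = r) && decide (max r j < j+1))) = true := by
              simp only [Bool.or_eq_true, Bool.and_eq_true, decide_eq_true_eq]
              omega
            rw [hX, Bool.true_and, halB, Bool.and_true, decide_eq_true (by omega : j ≠ r)]
          · intro t _ htj
            exact alPred_bump P r j r t (fun hh => htj (by omega))
        · rw [if_neg (fun hh => hri hh.1), h5 r hr, alAt, alAt]
          congr 1
          apply natMask_congr
          intro s _
          apply alPred_bump P i j r s
          intro hh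
          have : (r = i ∧ s = j) ∨ (r = j ∧ s = i) := by omega
          rcases this with ⟨ha, _⟩ | ⟨ha, _⟩
          · exact hri ha
          · exact hrj ha
  · rw [if_neg hal]
    have halB : alignedB P i j = false := by
      rw [alignedB, Bool.or_eq_false_iff, decide_eq_false_iff_not, decide_eq_false_iff_not]
      simp only [ptP]
      tauto
    obtain ⟨k1, k2, k3⟩ := innerK P i j (by omega) hiN hjN P.length st.1 0 0 h1 h2
      (by rw [h3 i j hiN hjN, cellAt, if_neg (by omega)]; rfl)
      (by rw [h3 j i hjN hiN, cellAt, if_neg (by omega)]; rfl)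
    refine ⟨k1, k2, ?_, h4, ?_⟩
    · intro r c hr hc
      rw [k3 r c]
      by_cases hij1 : r = i ∧ c = j
      · rw [if_pos hij1, cellAt, if_pos (by omega), hij1.1, hij1.2,
          cellVal_nonaligned P i j (by omega) hal]
        simp
      · by_cases hij2 : r = j ∧ c = i
        · rw [if_neg hij1, if_pos hij2, cellAt, if_pos (by omega), hij2.1, hij2.2,
            cellVal_symm, cellVal_nonaligned P i j (by omega) hal]
          simp
        · rw [if_neg hij1, if_neg hij2, h3 r c hr hc]
          apply cellAt_bump P i j r c
          intro hmin hmax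
          exfalso
          have : (r = i ∧ c = j) ∨ (r = j ∧ c = i) := by omega
          tauto
    · intro r hr
      rw [h5 r hr, alAt, alAt]
      congr 1
      apply natMask_congr
      intro s _
      by_cases hms : min r s = i ∧ max r s = j
      · have hrs : (r = i ∧ s = j) ∨ (r = j ∧ s = i) := by omega
        have halrs : alignedB P r s = false := by
          rcases hrs with ⟨ha, hb⟩ | ⟨ha, hb⟩
          · rw [ha, hb]; exact halB
          · rw [ha, hb, alignedB_symm]; exact halB
        rw [alPred, alPred, halrs, Bool.and_false, Bool.and_false]
      · exact alPred_bump P i j r s hms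

theorem conv_step (P : List (Int × Int)) (i0 : Nat) (st : List (List Int) × List Int)
    (h : InvA P i0 P.length st) : InvA P (i0+1) (i0+2) st := by
  obtain ⟨h1, h2, h3, h4, h5⟩ := h
  refine ⟨h1, h2, ?_, h4, ?_⟩
  · intro r c hr hc
    rw [h3 r c hr hc, cellAt, cellAt]
    split_ifs with hp hq hq
    · rfl
    · exfalso; omega
    · -- newly-covered cell: min r c = i0+1 = max r c, so r = c
      have hrc : r = c := by omega
      subst hrc
      rw [cellVal_diag]
    · rfl
  · intro r hr
    rw [h5 r hr, alAt, alAt]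
    congr 1
    apply natMask_congr
    intro s hs
    rw [alPred, alPred]
    by_cases hsr : s = r
    · simp [hsr]
    · have : (decide (min r s < i0) || (decide (min r s = i0) && decide (max r s < P.length))) =
             (decide (min r s < i0+1) || (decide (min r s = i0+1) && decide (max r s < i0+2))) := by
        apply Bool.eq_iff_iff.mpr
        simp only [Bool.or_eq_true, Bool.and_eq_true, decide_eq_true_eq]
        omega
      rw [this]

theorem innerLoop (P : List (Int × Int)) (i0 : Nat) :
    ∀ (m j0 : Nat), i0 < j0 → j0 + m = P.length →
      ∀ st, InvA P i0 j0 st →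
        InvA P i0 P.length ((List.range' j0 m).foldl (fun st j => aPairStep P i0 j st) st) := by
  intro m
  induction m with
  | zero =>
    intro j0 _ hsum st hst
    have : j0 = P.length := by omega
    subst this
    simpa using hst
  | succ m ih =>
    intro j0 hlt hsum st hst
    rw [List.range'_succ, List.foldl_cons]
    exact ih (j0+1) (by omega) (by omega) _ (oneStep P i0 j0 hlt (by omega) st hst)

theorem init_Inv (P : List (Int × Int)) :
    InvA P 0 1 (List.replicate P.length (List.replicate P.length (0 : Int)),
                List.replicate P.length (0 : Int)) := by
  refine ⟨by simp, ?_, ?_, by simp, ?_⟩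
  · intro r hr
    rw [List.getD_eq_getElem _ _ (by simpa using hr), List.getElem_replicate, List.length_replicate]
  · intro r c hr hc
    rw [valAt, List.getD_replicate _ hr, List.getD_replicate _ hc, cellAt]
    split_ifs with hp
    · have : r = c := by omega
      subst this
      rw [cellVal_diag]
    · rfl
  · intro r hr
    rw [List.getD_eq_getElem _ _ (by simpa using hr), List.getElem_replicate, alAt]
    have : natMask (alPred P 0 1 r) P.length = natMask (fun _ => false) P.length := by
      apply natMask_congr
      intro s _
      rw [alPred]
      by_cases hsr : s = r
      · simp [hsr]
      · have : (decide (min r s < 0) || (decide (min r s = 0) && decide (max r s < 1))) = false := by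
          simp only [Bool.or_eq_false_iff, Bool.and_eq_false_iff]
          constructor
          · simp
          · by_cases hm : min r s = 0
            · right; simp only [decide_eq_false_iff_not]; omega
            · left; simp [hm]
        rw [this, Bool.false_and, Bool.false_and]
    rw [this, natMask_false]
    rfl

theorem outerLoop (P : List (Int × Int)) :
    ∀ n, n ≤ P.length →
      InvA P n (n+1) ((List.range n).foldl (fun st i =>
          (List.range' (i+1) (P.length-(i+1))).foldl (fun st j => aPairStep P i j st) st)
        (List.replicate P.length (List.replicate P.length (0 : Int)),
         List.replicate P.length (0 : Int))) := by
  intro n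
  induction n with
  | zero => intro _; exact init_Inv P
  | succ n ih =>
    intro hn
    rw [List.range_succ, List.foldl_append, List.foldl_cons, List.foldl_nil]
    exact conv_step P n _ (innerLoop P n (P.length - (n+1)) (n+1) (by omega) (by omega) _
      (ih (by omega)))

theorem build_bitmasks_eq (P : List (Int × Int)) : build_bitmasks P = targetOut P := by
  simp only [build_bitmasks, targetOut]
  have h := outerLoop P P.length (le_refl _)
  revert h
  generalize ((List.range P.length).foldl (fun st i =>
      (List.range' (i+1) (P.length-(i+1))).foldl (fun st j => aPairStep P i j st) st)
    (List.replicate P.length (List.replicate P.length (0 : Int)),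
     List.replicate P.length (0 : Int))) = F
  intro h
  obtain ⟨h1, h2, h3, h4, h5⟩ := h
  apply Prod.ext
  · apply List.ext_getElem (by simpa using h1)
    intro r hrl hrr
    have hr : r < P.length := by simpa using hrr
    rw [List.getElem_map, List.getElem_range]
    apply List.ext_getElem
    · rw [List.length_map, List.length_range, ← List.getD_eq_getElem _ [] hrl]
      exact h2 r hr
    intro c hcl hcr
    have hc : c < P.length := by
      rw [List.length_map, List.length_range] at hcr
      exact hcr
    rw [List.getElem_map, List.getElem_range]
    have e1 : F.1.getD r [] = F.1[r]'hrl := List.getD_eq_getElem _ _ hrl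
    have e3 : valAt F.1 r c = (F.1[r]'hrl)[c]'hcl := by
      rw [valAt, e1, List.getD_eq_getElem _ _ hcl]
    exact e3.symm.trans (by rw [h3 r c hr hc, cellAt, if_pos (by omega)])
  · apply List.ext_getElem (by simpa using h4)
    intro r hrl hrr
    have hr : r < P.length := by simpa using hrr
    rw [List.getElem_map, List.getElem_range, ← List.getD_eq_getElem _ 0 hrl, h5 r hr, alAt,
        alignedVal]
    congr 1
    apply natMask_congr
    intro s hs
    rw [alPred]
    have : (decide (min r s < P.length) ||
            (decide (min r s = P.length) && decide (max r s < P.length + 1))) = true := by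
      simp only [Bool.or_eq_true, decide_eq_true_eq]
      left; omega
    rw [this, Bool.true_and]

-- ===== VERDICT (by name: the statement is the Claim_ definition above) =====
theorem build_bitmasks_spec : Claim_equal_build_bitmasks := by
  intro points _
  unfold Spec_build_bitmasks
  rw [build_bitmasks_eq, build_bitmasks_alt_eq]
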